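-- pv_equiv track=rewrite | github.com/pvansch267/AdventOfCode | Advent of Code/Day 10/Day 10.py | fnValidGapCombination
-- ===== SOURCE A (Python) =====
-- def fnValidGapCombination(list):
--     flValidGap = False
--     for id,val in enumerate(list):
--         if id < len(list)-1:
--             if list[id+1] - list[id] <= 3:
--                 flValidGap = True
--             else:
--                 flValidGap = False
--     return flValidGap
-- ===== SOURCE B (Python) =====
-- def fnValidGapCombination(list):
--     # closed form: only the last consecutive pair determines the flag
--     return len(list) >= 2 and list[-1] - list[-2] <= 3
-- ===== Notes on version B (the rewrite author's own statement) =====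
-- stated objective: faster
-- what changed: Replaces the loop over all pairs (whose flag is overwritten each iteration, so only the last pair survives) with a single closed-form check of the last two elements.
import Mathlib
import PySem

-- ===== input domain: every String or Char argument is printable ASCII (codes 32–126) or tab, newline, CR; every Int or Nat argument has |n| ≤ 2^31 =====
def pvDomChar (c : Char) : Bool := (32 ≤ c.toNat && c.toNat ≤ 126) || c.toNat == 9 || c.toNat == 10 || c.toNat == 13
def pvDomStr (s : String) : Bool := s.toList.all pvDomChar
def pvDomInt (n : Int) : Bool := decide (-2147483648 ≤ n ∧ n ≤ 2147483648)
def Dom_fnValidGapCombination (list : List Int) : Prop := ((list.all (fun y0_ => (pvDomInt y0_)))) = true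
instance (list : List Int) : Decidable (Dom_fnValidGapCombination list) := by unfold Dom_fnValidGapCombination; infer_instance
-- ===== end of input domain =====

-- B replaces A's loop (whose flag is overwritten at every pair, so only the last pair survives)
-- with a closed-form check of the last two elements: O(1) instead of O(n).


-- ===== PORT A =====
-- indices id and id+1 are always in range when the branch is taken, so pyGet? … |>.getD 0 is exact
def fnValidGapCombination (list : List Int) : Bool :=
  (PySem.List.enumerate list 0).foldl
    (fun flValidGap p =>
      if p.1 < (list.length : Int) - 1 then
        if (PySem.List.pyGet? list (p.1 + 1)).getD 0 - (PySem.List.pyGet? list p.1).getD 0 ≤ 3 then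
          true
        else
          false
      else flValidGap)
    false

-- ===== PORT B =====
-- len(list) >= 2 and list[-1] - list[-2] <= 3  (negative indices in range when the branch is taken)
def fnValidGapCombination_alt (list : List Int) : Bool :=
  if 2 ≤ list.length then
    decide ((PySem.List.pyGet? list (-1)).getD 0 - (PySem.List.pyGet? list (-2)).getD 0 ≤ 3)
  else
    false

-- ===== PRECONDITION & SPEC =====
def Spec_fnValidGapCombination (list : List Int) (out : Bool) : Prop := out = fnValidGapCombination_alt list
instance (list : List Int) (out : Bool) : Decidable (Spec_fnValidGapCombination list out) := by unfold Spec_fnValidGapCombination; infer_instance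

-- ===== CLAIM (what is proved, stated in full; the proofs are below) =====
def Claim_equal_fnValidGapCombination : Prop := ∀ (list : List Int), Dom_fnValidGapCombination list → Spec_fnValidGapCombination list (fnValidGapCombination list)

-- ===== LEMMAS AND PROOFS =====

theorem two_le_split {L : List Int} (h : 2 ≤ L.length) :
    ∃ init a b, L = init ++ [a, b] := by
  rcases hr : L.reverse with _ | ⟨b, t⟩
  · simp [List.reverse_eq_nil_iff] at hr; simp [hr] at h
  · rcases t with _ | ⟨a, t'⟩
    · have : L = [b] := by simpa using congrArg List.reverse hr
      simp [this] at h
    · refine ⟨t'.reverse, a, b, ?_⟩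
      have := congrArg List.reverse hr
      simpa using this

theorem fnValidGapCombination_spec_aux (L : List Int) :
    fnValidGapCombination L = fnValidGapCombination_alt L := by
  by_cases h : 2 ≤ L.length
  · obtain ⟨init, a, b, rfl⟩ := two_le_split h
    set L := init ++ [a, b] with hL
    have hlen : L.length = init.length + 2 := by simp [hL]
    have hgm : PySem.List.pyGet? L (init.length : Int) = some a := by
      have h0 := PySem.List.pyGet?_append_length (pre := init) (y := a) (ys := [b])
      rw [hL]
      exact h0
    have hgm1 : PySem.List.pyGet? L ((init.length : Int) + 1) = some b := by
      have := PySem.List.pyGet?_append_right (pre := init) (ys := [a, b]) (k := 1)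
      simp [hL] at this ⊢
      exact this
    have hA : fnValidGapCombination L = decide (b - a ≤ 3) := by
      unfold fnValidGapCombination
      rw [hL, PySem.List.enumerate_append, PySem.List.enumerate_cons,
        PySem.List.enumerate_cons, PySem.List.enumerate_nil, List.foldl_append]
      simp only [List.foldl_cons, List.foldl_nil]
      rw [← hL]
      have h1 : ((0 : Int) + init.length) < (L.length : Int) - 1 := by
        rw [hlen]; push_cast; omega
      have h2 : ¬ ((0 : Int) + init.length + 1 < (L.length : Int) - 1) := by
        rw [hlen]; push_cast; omega
      simp only [zero_add] at h1 h2 ⊢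
      rw [if_pos h1, if_neg h2, hgm, hgm1]
      simp only [Option.getD_some]
      split_ifs with hc <;> simp [hc]
    have hB : fnValidGapCombination_alt L = decide (b - a ≤ 3) := by
      unfold fnValidGapCombination_alt
      rw [if_pos h]
      have hlast : PySem.List.pyGet? L (-1) = some b := by
        rw [PySem.List.pyGet?_neg_one, hL]
        simp
      have hpen : PySem.List.pyGet? L (-2) = some a := by
        have := PySem.List.pyGet?_neg_natCast (xs := L) (k := 2) (by norm_num) (by omega)
        rw [hL] at this ⊢
        simp [hL] at hlen
        simpa [hlen, List.getElem?_append_right, Nat.add_sub_cancel] using this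
      rw [hlast, hpen]
      simp
    rw [hA, hB]
  · rcases L with _ | ⟨a, L⟩
    · simp [fnValidGapCombination, fnValidGapCombination_alt, PySem.List.enumerate_nil]
    · rcases L with _ | ⟨c, L'⟩
      · simp [fnValidGapCombination, fnValidGapCombination_alt,
          PySem.List.enumerate_cons, PySem.List.enumerate_nil]
      · simp at h

-- ===== VERDICT (by name: the statement is the Claim_ definition above) =====
theorem fnValidGapCombination_spec : Claim_equal_fnValidGapCombination := by
  intro L _
  unfold Spec_fnValidGapCombination
  exact fnValidGapCombination_spec_aux L
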